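-- pv_equiv track=rewrite | github.com/treska03/ASD-NAUKA | utilities.py | binselect
-- ===== SOURCE A (Python) =====
-- def binselect(T, x):
--     lo = 0
--     hi = len(T)
--     while lo < hi:
--         mid = (lo + hi) // 2
--         if x < T[mid]:
--             hi = mid
--         else:
--             lo = mid + 1
--
--     return lo
-- ===== SOURCE B (Python) =====
-- def binselect(T, x):
--     def go(lo, hi):
--         if lo >= hi:
--             return lo
--         mid = (lo + hi) // 2
--         if x < T[mid]:
--             return go(lo, mid)
--         return go(mid + 1, hi)
--     return go(0, len(T))
-- ===== Notes on version B (the rewrite author's own statement) =====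
-- stated objective: alternative
-- what changed: The iterative while-loop over mutable lo/hi is replaced by a recursive helper carrying the (lo, hi) window; the midpoint split test is identical, so results agree even on unsorted input.
import Mathlib
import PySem

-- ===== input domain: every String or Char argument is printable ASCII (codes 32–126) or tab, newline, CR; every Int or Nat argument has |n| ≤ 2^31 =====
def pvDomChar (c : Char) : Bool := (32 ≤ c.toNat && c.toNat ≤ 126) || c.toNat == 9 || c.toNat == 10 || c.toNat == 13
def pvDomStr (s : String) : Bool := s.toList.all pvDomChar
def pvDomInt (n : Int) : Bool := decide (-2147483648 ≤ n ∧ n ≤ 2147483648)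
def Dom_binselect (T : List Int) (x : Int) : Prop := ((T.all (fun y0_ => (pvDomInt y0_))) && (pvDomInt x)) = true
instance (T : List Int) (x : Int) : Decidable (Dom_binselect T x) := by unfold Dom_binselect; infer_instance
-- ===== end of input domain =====

-- B replaces A's while-loop over mutable lo/hi by a recursive helper on the (lo, hi) window
-- with the identical midpoint test, so the return value agrees on every input (sorted or not).

-- ===== PORT A =====
-- A's while-loop, ported as recursion on the decreasing measure (hi - lo).toNat over Int state.
def binselectLoop (T : List Int) (x lo hi : Int) : Int :=
  if h : lo < hi then
    let mid := PySem.Int.floordiv (lo + hi) 2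
    if x < PySem.List.pyGetD T mid 0 then
      binselectLoop T x lo mid
    else
      binselectLoop T x (mid + 1) hi
  else lo
termination_by (hi - lo).toNat
decreasing_by
  · have h1 : PySem.Int.floordiv (lo + hi) 2 < hi :=
      (PySem.Int.floordiv_lt_iff_lt_mul (by omega)).mpr (by omega)
    omega
  · have h2 : lo ≤ PySem.Int.floordiv (lo + hi) 2 :=
      (PySem.Int.le_floordiv_iff_mul_le (by omega)).mpr (by omega)
    omega

def binselect (T : List Int) (x : Int) : Int :=
  binselectLoop T x 0 (T.length : Int)

-- ===== PORT B =====
-- B's recursive helper go(lo, hi) over Nat indices.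
def binselectGo (T : List Int) (x : Int) (lo hi : Nat) : Nat :=
  if lo ≥ hi then lo
  else
    let mid := (lo + hi) / 2
    if x < T.getD mid 0 then binselectGo T x lo mid
    else binselectGo T x (mid + 1) hi
termination_by hi - lo
decreasing_by all_goals omega

def binselect_alt (T : List Int) (x : Int) : Int :=
  ((binselectGo T x 0 T.length : Nat) : Int)

-- ===== PRECONDITION & SPEC =====
def Spec_binselect (T : List Int) (x : Int) (out : Int) : Prop := out = binselect_alt T x
instance (T : List Int) (x : Int) (out : Int) : Decidable (Spec_binselect T x out) := by unfold Spec_binselect; infer_instance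

-- ===== CLAIM (what is proved, stated in full; the proofs are below) =====
def Claim_equal_binselect : Prop := ∀ (T : List Int) (x : Int), Dom_binselect T x → Spec_binselect T x (binselect T x)

-- ===== LEMMAS AND PROOFS =====

theorem binselectLoop_eq_go (T : List Int) (x : Int) :
    ∀ (n lo hi : Nat), hi - lo ≤ n →
      binselectLoop T x (lo : Int) (hi : Int) = ((binselectGo T x lo hi : Nat) : Int) := by
  intro n
  induction n with
  | zero =>
    intro lo hi hle
    rw [binselectLoop, binselectGo]
    have : ¬ ((lo : Int) < (hi : Int)) := by exact_mod_cast (by omega : ¬ lo < hi)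
    simp [this, (show lo ≥ hi by omega)]
  | succ n ih =>
    intro lo hi hle
    rw [binselectLoop, binselectGo]
    by_cases hlt : lo < hi
    · have hlt' : (lo : Int) < (hi : Int) := by exact_mod_cast hlt
      have hmid : PySem.Int.floordiv ((lo : Int) + (hi : Int)) 2 = (((lo + hi) / 2 : Nat) : Int) := by
        rw [← Nat.cast_add]
        exact_mod_cast PySem.Int.floordiv_natCast (lo + hi) 2
      have hget : PySem.List.pyGetD T (((lo + hi) / 2 : Nat) : Int) 0 = T.getD ((lo + hi) / 2) 0 :=
        PySem.List.pyGetD_natCast ..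
      have hmlt : (lo + hi) / 2 < hi := by omega
      have hmle : lo ≤ (lo + hi) / 2 := by omega
      simp only [hlt', dif_pos, hmid, hget, if_neg (show ¬ lo ≥ hi by omega)]
      split
      · exact ih lo ((lo + hi) / 2) (by omega)
      · have := ih ((lo + hi) / 2 + 1) hi (by omega)
        rw [← this]
        push_cast
        ring_nf
    · have hlt' : ¬ ((lo : Int) < (hi : Int)) := by exact_mod_cast hlt
      simp [hlt', (show lo ≥ hi by omega)]

-- ===== VERDICT (by name: the statement is the Claim_ definition above) =====
theorem binselect_spec : Claim_equal_binselect := by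
  intro T x _
  unfold Spec_binselect binselect binselect_alt
  have := binselectLoop_eq_go T x T.length 0 T.length (by omega)
  simpa using this
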